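-- pv_equiv track=rewrite | github.com/Alex1OPS/apatcher | test_docx.py | split_list_files
-- ===== SOURCE A (Python) =====
-- def split_list_files(lmass):
--     lm_db = []
--     lm_web = []
--     for item in lmass:
--         if "flexy-" in item:
--             lm_web.append(item)
--         else:
--             lm_db.append(item)
--
--     lm_db.sort()
--     lm_web.sort()
--
--     return lm_db, lm_web
-- ===== SOURCE B (Python) =====
-- def _insert_sorted(item, lst):
--     # binary search for item's sorted position, then splice it in (in place)
--     lo, hi = 0, len(lst)
--     while lo < hi:
--         mid = (lo + hi) // 2
--         if lst[mid] < item: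
--             lo = mid + 1
--         else:
--             hi = mid
--     lst.insert(lo, item)
--
--
-- def split_list_files(lmass):
--     lm_db = []
--     lm_web = []
--     for item in lmass:
--         if "flexy-" in item:
--             _insert_sorted(item, lm_web)
--         else:
--             _insert_sorted(item, lm_db)
--     return lm_db, lm_web
-- ===== Notes on version B (the rewrite author's own statement) =====
-- stated objective: alternative
-- what changed: B never calls sort: it makes a single online pass that binary-searches each item's position and splices it into the appropriate already-sorted list (bisect-insort style), instead of A's append-partition followed by two sort calls.
import Mathlib
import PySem

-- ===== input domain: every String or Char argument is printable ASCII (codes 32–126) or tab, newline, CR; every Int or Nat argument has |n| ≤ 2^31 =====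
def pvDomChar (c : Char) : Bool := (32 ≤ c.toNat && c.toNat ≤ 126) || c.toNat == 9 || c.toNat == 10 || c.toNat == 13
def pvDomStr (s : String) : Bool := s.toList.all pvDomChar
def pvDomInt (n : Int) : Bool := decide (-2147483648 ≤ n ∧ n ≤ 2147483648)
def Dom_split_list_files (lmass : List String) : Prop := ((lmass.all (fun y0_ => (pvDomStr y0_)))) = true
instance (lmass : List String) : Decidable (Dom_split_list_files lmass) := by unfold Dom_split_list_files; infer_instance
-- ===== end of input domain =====

-- B replaces A's partition-then-sort with a single online pass that never calls sort: each item is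
-- spliced into its binary-searched position in the appropriate list. Objective: alternative.

-- ===== PORT A =====
def split_list_files (lmass : List String) : List String × List String :=
  let acc := lmass.foldl
    (fun (acc : List String × List String) item =>
      if PySem.Str.isIn "flexy-" item then (acc.1, acc.2 ++ [item]) else (acc.1 ++ [item], acc.2))
    ([], [])
  (PySem.List.sorted acc.1 (fun x => x) false, PySem.List.sorted acc.2 (fun x => x) false)

-- ===== PORT B =====
-- Source B's `while lo < hi` binary-search loop, step for step (termination: hi - lo shrinks).
-- lst[mid]: mid < hi ≤ len(lst) at every call reached from binInsert, so the index is always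
-- in range and the `getD` default is never used (exact).
def blLoop (lst : List String) (item : String) (lo hi : Nat) : Nat :=
  if _h : lo < hi then
    if lst.getD ((lo + hi) / 2) "" < item then blLoop lst item ((lo + hi) / 2 + 1) hi
    else blLoop lst item lo ((lo + hi) / 2)
  else lo
termination_by hi - lo
decreasing_by all_goals omega

-- Source B's `lst.insert(lo, item)` (lo is the loop's Nat result) is PySem.List.insert (exact).
def binInsert (item : String) (lst : List String) : List String :=
  let lo := blLoop lst item 0 lst.length
  PySem.List.insert lst (lo : Int) item

def split_list_files_alt (lmass : List String) : List String × List String :=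
  lmass.foldl
    (fun (acc : List String × List String) item =>
      if PySem.Str.isIn "flexy-" item then (acc.1, binInsert item acc.2)
      else (binInsert item acc.1, acc.2))
    ([], [])

-- ===== PRECONDITION & SPEC =====
def Spec_split_list_files (lmass : List String) (out : List String × List String) : Prop := out = split_list_files_alt lmass
instance (lmass : List String) (out : List String × List String) : Decidable (Spec_split_list_files lmass out) := by unfold Spec_split_list_files; infer_instance

-- ===== CLAIM (what is proved, stated in full; the proofs are below) =====
def Claim_equal_split_list_files : Prop := ∀ (lmass : List String), Dom_split_list_files lmass → Spec_split_list_files lmass (split_list_files lmass)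

-- ===== LEMMAS AND PROOFS =====

-- Proof-side reference insertion (linear form of the same splice); used only in the lemmas.
def insertSorted (item : String) (lst : List String) : List String :=
  match lst with
  | [] => [item]
  | y :: ys => if y < item then y :: insertSorted item ys else item :: y :: ys

-- A's loop accumulates: first component the non-matching items, second the matching ones.
theorem pv_fold_split (l : List String) (acc : List String × List String) :
    l.foldl
      (fun (acc : List String × List String) item =>
        if PySem.Str.isIn "flexy-" item then (acc.1, acc.2 ++ [item]) else (acc.1 ++ [item], acc.2))
      acc
    = (acc.1 ++ l.filter (fun x => !(PySem.Str.isIn "flexy-" x)),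
       acc.2 ++ l.filter (fun x => PySem.Str.isIn "flexy-" x)) := by
  induction l generalizing acc with
  | nil => simp
  | cons x xs ih =>
    simp only [List.foldl_cons]
    by_cases h : PySem.Str.isIn "flexy-" x
    · rw [if_pos h, ih]; simp [List.filter_cons]; simpa [PySem.Str.isIn] using h
    · rw [if_neg h, ih]; simp [List.filter_cons]; simpa [PySem.Str.isIn] using h

theorem pv_insertSorted_perm (item : String) (l : List String) :
    (insertSorted item l).Perm (item :: l) := by
  induction l with
  | nil => simp [insertSorted]
  | cons y ys ih =>
    simp only [insertSorted]
    by_cases h : y < item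
    · rw [if_pos h]
      exact (ih.cons y).trans (List.Perm.swap item y ys)
    · rw [if_neg h]

theorem pv_insertSorted_pairwise (item : String) (l : List String)
    (hl : l.Pairwise (· ≤ ·)) : (insertSorted item l).Pairwise (· ≤ ·) := by
  induction l with
  | nil => simp [insertSorted]
  | cons y ys ih =>
    rcases List.pairwise_cons.1 hl with ⟨hy, hys⟩
    simp only [insertSorted]
    by_cases h : y < item
    · rw [if_pos h]
      refine List.pairwise_cons.2 ⟨?_, ih hys⟩
      intro z hz
      rcases List.mem_cons.1 ((pv_insertSorted_perm item ys).mem_iff.1 hz) with rfl | hz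
      · exact le_of_lt h
      · exact hy z hz
    · rw [if_neg h]
      refine List.pairwise_cons.2 ⟨?_, hl⟩
      intro z hz
      rcases List.mem_cons.1 hz with rfl | hz
      · exact le_of_not_gt h
      · exact le_trans (le_of_not_gt h) (hy z hz)

-- a sorted list is monotone in getD (within range)
theorem pv_getD_mono (l : List String) (hs : l.Pairwise (· ≤ ·))
    {i j : Nat} (hij : i ≤ j) (hj : j < l.length) : l.getD i "" ≤ l.getD j "" := by
  rcases lt_or_eq_of_le hij with h | rfl
  · rw [List.getD_eq_getElem l "" (lt_trans h hj), List.getD_eq_getElem l "" hj]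
    exact List.pairwise_iff_getElem.1 hs i j (lt_trans h hj) hj h
  · exact le_refl _

-- binary-search invariant: the returned index separates the < item prefix from the ≥ item suffix
theorem pv_blLoop_spec (lst : List String) (item : String) (hs : lst.Pairwise (· ≤ ·)) :
    ∀ (lo hi : Nat), lo ≤ hi → hi ≤ lst.length →
      (∀ j, j < lo → lst.getD j "" < item) →
      (∀ j, hi ≤ j → j < lst.length → item ≤ lst.getD j "") →
      (blLoop lst item lo hi ≤ lst.length ∧
        (∀ j, j < blLoop lst item lo hi → lst.getD j "" < item) ∧
        (∀ j, blLoop lst item lo hi ≤ j → j < lst.length → item ≤ lst.getD j "")) := by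
  intro lo hi
  induction lo, hi using blLoop.induct lst item with
  | case1 lo hi hlt hc ih =>
    intro _ hhi h1 h2
    rw [blLoop, dif_pos hlt, if_pos hc]
    refine ih (by omega) hhi ?_ h2
    intro j hj
    exact lt_of_le_of_lt (pv_getD_mono lst hs (by omega) (by omega)) hc
  | case2 lo hi hlt hc ih =>
    intro hle hhi h1 h2
    rw [blLoop, dif_pos hlt, if_neg hc]
    refine ih (by omega) (by omega) h1 ?_
    intro j hj hjl
    exact le_trans (le_of_not_gt hc) (pv_getD_mono lst hs hj hjl)
  | case3 lo hi hnlt =>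
    intro hle hhi h1 h2
    rw [blLoop, dif_neg hnlt]
    exact ⟨by omega, h1, fun j hj hjl => h2 j (by omega) hjl⟩

-- splicing at the separating index is exactly linear sorted insertion
theorem pv_splice_eq (item : String) :
    ∀ (lst : List String) (r : Nat), r ≤ lst.length →
      (∀ j, j < r → lst.getD j "" < item) →
      (∀ j, r ≤ j → j < lst.length → item ≤ lst.getD j "") →
      lst.take r ++ item :: lst.drop r = insertSorted item lst := by
  intro lst
  induction lst with
  | nil =>
    intro r hr _ _
    have hr0 : r = 0 := by simpa using hr
    subst hr0
    simp [insertSorted]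
  | cons y ys ih =>
    intro r hr h1 h2
    match r with
    | 0 =>
      have hiy : item ≤ y := h2 0 (le_refl 0) (by simp)
      simp only [List.take_zero, List.drop_zero, List.nil_append]
      rw [insertSorted, if_neg (not_lt_of_ge hiy)]
    | Nat.succ s =>
      have hy : y < item := h1 0 (Nat.succ_pos s)
      simp only [List.take_succ_cons, List.drop_succ_cons, insertSorted, if_pos hy,
        List.cons_append, List.cons.injEq, true_and]
      exact ih s (by simpa using hr) (fun j hj => h1 (j + 1) (by omega))
        (fun j hj hjl => h2 (j + 1) (by omega) (by simpa using hjl))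

theorem pv_binInsert_eq (item : String) (lst : List String) (hs : lst.Pairwise (· ≤ ·)) :
    binInsert item lst = insertSorted item lst := by
  obtain ⟨hle, h1, h2⟩ := pv_blLoop_spec lst item hs 0 lst.length (Nat.zero_le _) (le_refl _)
    (by omega) (by omega)
  show PySem.List.insert lst _ item = _
  rw [PySem.List.insert_natCast lst _ item hle]
  exact pv_splice_eq item lst _ hle h1 h2

-- B's loop equals the same loop with linear insertion: both accumulators stay sorted.
theorem pv_fold_bin_eq_ins (l : List String) :
    ∀ (acc : List String × List String),
      acc.1.Pairwise (· ≤ ·) → acc.2.Pairwise (· ≤ ·) →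
      l.foldl
        (fun (acc : List String × List String) item =>
          if PySem.Str.isIn "flexy-" item then (acc.1, binInsert item acc.2)
          else (binInsert item acc.1, acc.2))
        acc
      = l.foldl
        (fun (acc : List String × List String) item =>
          if PySem.Str.isIn "flexy-" item then (acc.1, insertSorted item acc.2)
          else (insertSorted item acc.1, acc.2))
        acc := by
  induction l with
  | nil => intro acc _ _; rfl
  | cons x xs ih =>
    intro acc ha1 ha2
    simp only [List.foldl_cons]
    by_cases h : PySem.Str.isIn "flexy-" x
    · rw [if_pos h, if_pos h, pv_binInsert_eq x acc.2 ha2]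
      exact ih _ ha1 (pv_insertSorted_pairwise x acc.2 ha2)
    · rw [if_neg h, if_neg h, pv_binInsert_eq x acc.1 ha1]
      exact ih _ (pv_insertSorted_pairwise x acc.1 ha1) ha2

-- the linear-insertion loop splits into two independent insertion folds over the filtered halves
theorem pv_fold_ins_split (l : List String) (acc : List String × List String) :
    l.foldl
      (fun (acc : List String × List String) item =>
        if PySem.Str.isIn "flexy-" item then (acc.1, insertSorted item acc.2)
        else (insertSorted item acc.1, acc.2))
      acc
    = ((l.filter (fun x => !(PySem.Str.isIn "flexy-" x))).foldl (fun c it => insertSorted it c) acc.1,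
       (l.filter (fun x => PySem.Str.isIn "flexy-" x)).foldl (fun c it => insertSorted it c) acc.2) := by
  induction l generalizing acc with
  | nil => simp
  | cons x xs ih =>
    simp only [List.foldl_cons]
    by_cases h : PySem.Str.isIn "flexy-" x
    · rw [if_pos h, ih]
      rw [List.filter_cons, List.filter_cons, h]; simp
    · rw [if_neg h, ih]
      rw [List.filter_cons, List.filter_cons, Bool.not_eq_true] at *
      rw [h]; simp

theorem pv_insfold_perm (l : List String) :
    (l.foldl (fun c it => insertSorted it c) []).Perm l := by
  suffices h : ∀ (acc : List String),
      (l.foldl (fun c it => insertSorted it c) acc).Perm (acc ++ l) by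
    simpa using h []
  induction l with
  | nil => simp
  | cons x xs ih =>
    intro acc
    simp only [List.foldl_cons]
    refine (ih (insertSorted x acc)).trans ?_
    have : (insertSorted x acc ++ xs).Perm ((x :: acc) ++ xs) :=
      (pv_insertSorted_perm x acc).append_right xs
    refine this.trans ?_
    simpa using List.perm_middle.symm.trans (by simp)

theorem pv_insfold_pairwise (l : List String) :
    (l.foldl (fun c it => insertSorted it c) []).Pairwise (· ≤ ·) := by
  suffices h : ∀ (acc : List String), acc.Pairwise (· ≤ ·) →
      (l.foldl (fun c it => insertSorted it c) acc).Pairwise (· ≤ ·) by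
    exact h [] (by simp)
  induction l with
  | nil => intro acc hacc; simpa using hacc
  | cons x xs ih =>
    intro acc hacc
    simp only [List.foldl_cons]
    exact ih _ (pv_insertSorted_pairwise x acc hacc)

-- Python's sorted of any list equals the insertion fold over the same list.
theorem pv_sorted_eq_insfold (l : List String) :
    PySem.List.sorted l (fun x => x) false = l.foldl (fun c it => insertSorted it c) [] :=
  PySem.List.sorted_id_eq_of_perm_of_pairwise l _ (pv_insfold_perm l) (pv_insfold_pairwise l)

-- ===== VERDICT (by name: the statement is the Claim_ definition above) =====
theorem split_list_files_spec : Claim_equal_split_list_files := by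
  intro lmass _
  show _ = _
  rw [split_list_files_alt, pv_fold_bin_eq_ins lmass ([], []) (by simp) (by simp)]
  simp only [split_list_files, pv_fold_split, pv_fold_ins_split]
  simp [pv_sorted_eq_insfold]
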